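-- pv_equiv track=rewrite | github.com/ZZy979/LeetCode | Algorithms/2612/minReverseOperations.py | minReverseOperations
-- ===== SOURCE A (Python) =====
-- from typing import List
--
-- from collections import deque
--
-- def minReverseOperations(n: int, p: int, banned: List[int], k: int) -> List[int]:
--     moves = range(-k + 1, k, 2)
--     ans = [-1] * n
--     ans[p] = 0
--     banned = set(banned)
--     q = deque([(p, 1)])
--     visited = {p}
--     while q:
--         i, op = q.popleft()
--         for m in moves:
--             j = i + m
--             if 0 <= j < n and k - 1 <= i + j <= 2 * (n - 1) - (k - 1) and j not in visited and j not in banned: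
--                 ans[j] = op
--                 visited.add(j)
--                 q.append((j, op + 1))
--     return ans
-- ===== SOURCE B (Python) =====
-- from collections import deque
-- from bisect import bisect_left, bisect_right
-- from typing import List
--
-- def minReverseOperations(n: int, p: int, banned: List[int], k: int) -> List[int]:
--     ans = [-1] * n
--     ans[p] = 0
--     bset = set(banned)
--     unvisited = [[], []]
--     for i in range(n):
--         if i != p and i not in bset:
--             unvisited[i % 2].append(i)
--     q = deque([(p, 1)])
--     while q:
--         i, op = q.popleft()
--         lo = max(i - k + 1, k - 1 - i)
--         hi = min(i + k - 1, 2 * (n - 1) - (k - 1) - i)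
--         if lo <= hi:
--             arr = unvisited[lo % 2]
--             a = bisect_left(arr, lo)
--             b = bisect_right(arr, hi)
--             for j in arr[a:b]:
--                 ans[j] = op
--                 q.append((j, op + 1))
--             del arr[a:b]
--     return ans
-- ===== Notes on version B (the rewrite author's own statement) =====
-- stated objective: faster
-- what changed: A expands each BFS node by scanning all k candidate moves and testing each against a visited set (O(n*k)); B keeps the still-unvisited indices in two sorted lists split by parity and, per dequeued node, extracts the whole reachable window [lo,hi] at once with bisect and deletes it, so every index is examined O(1) times after the O(n) build.
import Mathlib
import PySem

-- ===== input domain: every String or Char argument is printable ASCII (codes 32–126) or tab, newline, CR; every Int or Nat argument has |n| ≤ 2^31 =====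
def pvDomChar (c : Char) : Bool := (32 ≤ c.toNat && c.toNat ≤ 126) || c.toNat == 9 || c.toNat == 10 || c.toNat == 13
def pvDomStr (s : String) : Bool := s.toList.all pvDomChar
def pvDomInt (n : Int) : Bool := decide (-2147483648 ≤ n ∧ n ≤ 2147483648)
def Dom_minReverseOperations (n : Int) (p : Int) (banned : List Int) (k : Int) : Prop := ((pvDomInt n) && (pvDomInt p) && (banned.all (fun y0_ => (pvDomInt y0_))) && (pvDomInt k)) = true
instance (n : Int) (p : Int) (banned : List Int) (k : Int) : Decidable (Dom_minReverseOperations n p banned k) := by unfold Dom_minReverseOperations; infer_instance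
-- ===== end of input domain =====

-- B replaces A's per-node scan over all k reversal moves (with a visited-set test per move)
-- by two sorted lists of still-unvisited indices split by parity: each BFS pop extracts the whole
-- reachable window [lo, hi] via bisect and deletes it, so every index is touched O(1) times after
-- the O(n) build.  (Return value only; neither side mutates its arguments.)

-- ===== PORT A =====
-- body of A's inner 'for m in moves' loop, phrased on j = i + m (the only use A makes of m)
def minRevBody (n k : Int) (bset : PySem.Set Int) (i op : Int)
    (st : List Int × PySem.Set Int × List (Int × Int)) (j : Int) :
    List Int × PySem.Set Int × List (Int × Int) :=
  if 0 ≤ j ∧ j < n ∧ k - 1 ≤ i + j ∧ i + j ≤ 2 * (n - 1) - (k - 1) ∧ j ∉ st.2.1 ∧ j ∉ bset then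
    (PySem.List.pySetD st.1 j op, PySem.Set.add st.2.1 j, st.2.2 ++ [(j, op + 1)])
  else st

def minRevStepA (n k : Int) (bset : PySem.Set Int) (i op : Int)
    (st : List Int × PySem.Set Int × List (Int × Int)) (m : Int) :
    List Int × PySem.Set Int × List (Int × Int) :=
  minRevBody n k bset i op st (i + m)   -- j = i + m

-- 'while q:' — fuel n+2 strictly exceeds the ≤ n+1 iterations Python performs (every dequeued
-- node beyond the first was added to 'visited', all distinct and in [0, n))
def minRevLoopA (n k : Int) (bset : PySem.Set Int) :
    Nat → List Int → PySem.Set Int → List (Int × Int) → List Int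
  | 0, ans, _, _ => ans
  | _ + 1, ans, _, [] => ans
  | fuel + 1, ans, visited, (i, op) :: q =>
      let st := (PySem.List.pyRange (-k + 1) k 2).foldl (minRevStepA n k bset i op) (ans, visited, q)
      minRevLoopA n k bset fuel st.1 st.2.1 st.2.2

def minReverseOperations (n : Int) (p : Int) (banned : List Int) (k : Int) : List Int :=
  minRevLoopA n k (PySem.Set.ofList banned) (n.toNat + 2)
    (PySem.List.pySetD (List.replicate n.toNat (-1)) p 0) [p] [(p, 1)]

-- ===== PORT B =====
-- body of B's 'for j in arr[a:b]' loop
def minRevStepB (op : Int) (st : List Int × List (Int × Int)) (j : Int) :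
    List Int × List (Int × Int) :=
  (PySem.List.pySetD st.1 j op, st.2 ++ [(j, op + 1)])

-- body of B's build loop 'for i in range(n)'; unvisited = [[], []] is the pair (uv.1, uv.2)
def minRevBuild (p : Int) (bset : PySem.Set Int) (uv : List Int × List Int) (i : Int) :
    List Int × List Int :=
  if i ≠ p ∧ i ∉ bset then
    if PySem.Int.mod i 2 = 0 then (uv.1 ++ [i], uv.2) else (uv.1, uv.2 ++ [i])
  else uv

-- 'while q:' — same fuel bound as A's loop (B dequeues exactly the nodes A does)
def minRevLoopB (n k : Int) : Nat → List Int → List Int → List Int → List (Int × Int) → List Int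
  | 0, ans, _, _, _ => ans
  | _ + 1, ans, _, _, [] => ans
  | fuel + 1, ans, u0, u1, (i, op) :: q =>
      let lo := max (i - k + 1) (k - 1 - i)
      let hi := min (i + k - 1) (2 * (n - 1) - (k - 1) - i)
      if lo ≤ hi then
        let arr := if PySem.Int.mod lo 2 = 0 then u0 else u1
        let a := PySem.List.bisectLeft arr lo
        let b := PySem.List.bisectRight arr hi
        -- arr[a:b] (Nat bounds: slice_natCast) and del arr[a:b] (arr[:a] ++ arr[b:])
        let st := ((arr.drop a).take (b - a)).foldl (minRevStepB op) (ans, q)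
        let arr' := arr.take a ++ arr.drop b
        minRevLoopB n k fuel st.1 (if PySem.Int.mod lo 2 = 0 then arr' else u0)
          (if PySem.Int.mod lo 2 = 0 then u1 else arr') st.2
      else minRevLoopB n k fuel ans u0 u1 q

def minReverseOperations_alt (n : Int) (p : Int) (banned : List Int) (k : Int) : List Int :=
  let bset := PySem.Set.ofList banned
  let uv := (PySem.List.pyRange 0 n 1).foldl (minRevBuild p bset) ([], [])
  minRevLoopB n k (n.toNat + 2)
    (PySem.List.pySetD (List.replicate n.toNat (-1)) p 0) uv.1 uv.2 [(p, 1)]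

-- ===== PRECONDITION & SPEC =====
-- exactly where Python's 'ans[p] = 0' succeeds (len(ans) = max n 0); everywhere else A raises IndexError
def Pre_minReverseOperations (n : Int) (p : Int) (banned : List Int) (k : Int) : Prop :=
  PySem.Raise.InRange n.toNat p
instance (n : Int) (p : Int) (banned : List Int) (k : Int) :
    Decidable (Pre_minReverseOperations n p banned k) := by
  unfold Pre_minReverseOperations; infer_instance

def pvWitness_minReverseOperations : Int × Int × List Int × Int := (6, 2, [1, 4], 4)

def Spec_minReverseOperations (n : Int) (p : Int) (banned : List Int) (k : Int) (out : List Int) : Prop := out = minReverseOperations_alt n p banned k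
instance (n : Int) (p : Int) (banned : List Int) (k : Int) (out : List Int) : Decidable (Spec_minReverseOperations n p banned k out) := by unfold Spec_minReverseOperations; infer_instance

-- ===== CLAIM (what is proved, stated in full; the proofs are below) =====
def Claim_equal_minReverseOperations : Prop := ∀ (n : Int) (p : Int) (banned : List Int) (k : Int), Dom_minReverseOperations n p banned k → Pre_minReverseOperations n p banned k → Spec_minReverseOperations n p banned k (minReverseOperations n p banned k)

-- ===== LEMMAS AND PROOFS =====

-- the BFS correspondence invariant: u0/u1 are the sorted unvisited, unbanned indices of each parity
def MRInv (n : Int) (bset visited : PySem.Set Int) (u0 u1 : List Int) : Prop :=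
  u0.Pairwise (· < ·) ∧ u1.Pairwise (· < ·) ∧
  (∀ j : Int, j ∈ u0 ↔ 0 ≤ j ∧ j < n ∧ j % 2 = 0 ∧ j ∉ visited ∧ j ∉ bset) ∧
  (∀ j : Int, j ∈ u1 ↔ 0 ≤ j ∧ j < n ∧ j % 2 = 1 ∧ j ∉ visited ∧ j ∉ bset)

-- A's inner loop, characterised: it processes the accepted js in order
lemma foldA_char (n k : Int) (bset : PySem.Set Int) (i op : Int) :
    ∀ (js : List Int), js.Nodup → ∀ (visited : PySem.Set Int) (ans : List Int) (q : List (Int × Int)),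
      js.foldl (minRevBody n k bset i op) (ans, visited, q) =
        (let L := js.filter (fun j => decide (0 ≤ j ∧ j < n ∧ k - 1 ≤ i + j ∧
            i + j ≤ 2 * (n - 1) - (k - 1) ∧ j ∉ visited ∧ j ∉ bset));
         (L.foldl (fun a j => PySem.List.pySetD a j op) ans, visited ++ L,
          q ++ L.map (fun j => (j, op + 1)))) := by
  intro js
  induction js with
  | nil => intro _ visited ans q; simp
  | cons j t ih =>
    intro hnd visited ans q
    have hjt : j ∉ t := (List.nodup_cons.1 hnd).1
    have hndt : t.Nodup := (List.nodup_cons.1 hnd).2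
    simp only [List.foldl_cons, List.filter_cons]
    by_cases hc : 0 ≤ j ∧ j < n ∧ k - 1 ≤ i + j ∧ i + j ≤ 2 * (n - 1) - (k - 1) ∧ j ∉ visited ∧ j ∉ bset
    · have hstep : minRevBody n k bset i op (ans, visited, q) j =
          (PySem.List.pySetD ans j op, visited ++ [j], q ++ [(j, op + 1)]) := by
        simp only [minRevBody, if_pos hc]
        rw [PySem.Set.add_of_not_mem hc.2.2.2.2.1]
      rw [hstep, ih hndt]
      have hfe : t.filter (fun x => decide (0 ≤ x ∧ x < n ∧ k - 1 ≤ i + x ∧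
            i + x ≤ 2 * (n - 1) - (k - 1) ∧ x ∉ visited ++ [j] ∧ x ∉ bset)) =
          t.filter (fun x => decide (0 ≤ x ∧ x < n ∧ k - 1 ≤ i + x ∧
            i + x ≤ 2 * (n - 1) - (k - 1) ∧ x ∉ visited ∧ x ∉ bset)) := by
        apply List.filter_congr
        intro x hx
        have hxj : x ≠ j := fun h => hjt (h ▸ hx)
        simp [List.mem_append, hxj]
      simp only [hfe, decide_eq_true_eq, if_pos hc]
      simp [List.foldl_cons, List.append_assoc]
    · have hstep : minRevBody n k bset i op (ans, visited, q) j = (ans, visited, q) := by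
        simp only [minRevBody, if_neg hc]
      rw [hstep, ih hndt]
      simp only [decide_eq_true_eq, if_neg hc]

-- B's inner loop, characterised
lemma foldB_char (op : Int) (chunk : List Int) (ans : List Int) (q : List (Int × Int)) :
    chunk.foldl (minRevStepB op) (ans, q) =
      (chunk.foldl (fun a j => PySem.List.pySetD a j op) ans,
       q ++ chunk.map (fun j => (j, op + 1))) := by
  show chunk.foldl (fun st j => (PySem.List.pySetD st.1 j op, st.2 ++ [(j, op + 1)])) (ans, q) = _
  rw [PySem.List.foldl_prod_mk (f := fun a j => PySem.List.pySetD a j op)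
      (g := fun q j => q ++ [(j, op + 1)])]
  rw [PySem.List.foldl_append_singleton_eq_map]

-- the bisect window of a strictly sorted list
lemma bisect_window (arr : List Int) (lo hi : Int) (hs : arr.Pairwise (· < ·)) (hlh : lo ≤ hi) :
    PySem.List.bisectLeft arr lo ≤ PySem.List.bisectRight arr hi ∧
    PySem.List.bisectRight arr hi ≤ arr.length ∧
    (∀ j : Int, j ∈ (arr.drop (PySem.List.bisectLeft arr lo)).take
        (PySem.List.bisectRight arr hi - PySem.List.bisectLeft arr lo) ↔
      j ∈ arr ∧ lo ≤ j ∧ j ≤ hi) ∧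
    (∀ j : Int, j ∈ arr.take (PySem.List.bisectLeft arr lo) ++
        arr.drop (PySem.List.bisectRight arr hi) ↔
      j ∈ arr ∧ ¬(lo ≤ j ∧ j ≤ hi)) := by
  have hs' : arr.Pairwise (· ≤ ·) := hs.imp (fun h => le_of_lt h)
  obtain ⟨haL, hlt, hge⟩ := PySem.List.bisectLeft_spec arr lo hs'
  obtain ⟨hbL, hlt', hge'⟩ := PySem.List.bisectRight_spec arr hi hs'
  set a := PySem.List.bisectLeft arr lo with hadef
  set b := PySem.List.bisectRight arr hi with hbdef
  have hab : a ≤ b := by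
    by_contra h
    have hb : b < arr.length := by omega
    have h1 : arr[b] < lo := hlt b hb (by omega)
    have h2 : hi < arr[b] := hge' b hb le_rfl
    omega
  refine ⟨hab, hbL, ?_, ?_⟩
  · intro j
    constructor
    · intro hj
      obtain ⟨t, ht, hjt⟩ := List.mem_iff_getElem.1 hj
      have htlen : t < (arr.drop a).length := by
        have := (List.length_take ..).symm ▸ ht; simp at this ⊢; omega
      have hat : a + t < arr.length := by simp at htlen; omega
      have hjv : arr[a + t] = j := by
        rw [← hjt]; rw [List.getElem_take, List.getElem_drop]
      have htb : t < b - a := by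
        have := (List.length_take ..).symm ▸ ht; simp at this; omega
      refine ⟨hjv ▸ List.getElem_mem _, ?_, ?_⟩
      · have := hge (a + t) hat (by omega); omega
      · have := hlt' (a + t) hat (by omega); omega
    · rintro ⟨hj, hlo, hhi⟩
      obtain ⟨t, ht, hjt⟩ := List.mem_iff_getElem.1 hj
      have h1 : a ≤ t := by
        by_contra h
        have := hlt t ht (by omega); omega
      have h2 : t < b := by
        by_contra h
        have := hge' t ht (by omega); omega
      apply List.mem_iff_getElem.2
      refine ⟨t - a, ?_, ?_⟩
      · simp; omega
      · rw [List.getElem_take, List.getElem_drop]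
        rw [← hjt]; congr 1; omega
  · intro j
    constructor
    · intro hj
      rcases List.mem_append.1 hj with h | h
      · obtain ⟨t, ht, hjt⟩ := List.mem_iff_getElem.1 h
        have ht' : t < a := by simp at ht; omega
        have htl : t < arr.length := by simp at ht; omega
        have hjv : arr[t] = j := by rw [← hjt, List.getElem_take]
        have := hlt t htl ht'
        exact ⟨hjv ▸ List.getElem_mem _, by omega⟩
      · obtain ⟨t, ht, hjt⟩ := List.mem_iff_getElem.1 h
        have htl : b + t < arr.length := by simp at ht; omega
        have hjv : arr[b + t] = j := by rw [← hjt, List.getElem_drop]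
        have := hge' (b + t) htl (by omega)
        exact ⟨hjv ▸ List.getElem_mem _, by omega⟩
    · rintro ⟨hj, hw⟩
      obtain ⟨t, ht, hjt⟩ := List.mem_iff_getElem.1 hj
      apply List.mem_append.2
      by_cases h : t < a
      · left
        apply List.mem_iff_getElem.2
        exact ⟨t, by simp; omega, by rw [List.getElem_take]; exact hjt⟩
      · right
        have h2 : b ≤ t := by
          by_contra h2
          have := hge t ht (by omega)
          have := hlt' t ht (by omega)
          omega
        apply List.mem_iff_getElem.2
        refine ⟨t - b, by simp; omega, ?_⟩
        rw [List.getElem_drop, ← hjt]; congr 1; omega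

-- the extracted chunk is any strictly sorted enumeration of the window; the rest is its complement
lemma chunk_eq (arr L : List Int) (lo hi : Int) (hs : arr.Pairwise (· < ·)) (hw : lo ≤ hi)
    (hLs : L.Pairwise (· < ·)) (hLm : ∀ j, j ∈ L ↔ j ∈ arr ∧ lo ≤ j ∧ j ≤ hi) :
    L = (arr.drop (PySem.List.bisectLeft arr lo)).take
        (PySem.List.bisectRight arr hi - PySem.List.bisectLeft arr lo) ∧
    (∀ j : Int, j ∈ arr.take (PySem.List.bisectLeft arr lo) ++
        arr.drop (PySem.List.bisectRight arr hi) ↔ j ∈ arr ∧ ¬(lo ≤ j ∧ j ≤ hi)) ∧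
    (arr.take (PySem.List.bisectLeft arr lo) ++
        arr.drop (PySem.List.bisectRight arr hi)).Pairwise (· < ·) := by
  obtain ⟨hab, hbl, hcm, hrm⟩ := bisect_window arr lo hi hs hw
  set a := PySem.List.bisectLeft arr lo
  set b := PySem.List.bisectRight arr hi
  have hchunk_sub : ((arr.drop a).take (b - a)).Sublist arr :=
    (List.take_sublist _ _).trans (List.drop_sublist _ _)
  have hchunk_s : ((arr.drop a).take (b - a)).Pairwise (· < ·) := hs.sublist hchunk_sub
  have hLeq : L = (arr.drop a).take (b - a) := by
    apply PySem.List.eq_of_perm_of_pairwise_le_of_injective (fun x => x) Function.injective_id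
    · refine (List.perm_ext_iff_of_nodup (hLs.imp ne_of_lt) (hchunk_s.imp ne_of_lt)).2 ?_
      intro j; rw [hLm j, hcm j]
    · exact hLs.imp le_of_lt
    · exact hchunk_s.imp le_of_lt
  have hrest_s : (arr.take a ++ arr.drop b).Pairwise (· < ·) := by
    have hdd : arr.drop b = (arr.drop a).drop (b - a) := by
      rw [List.drop_drop]; congr 1; omega
    have hsub : (arr.take a ++ arr.drop b).Sublist (arr.take a ++ arr.drop a) := by
      apply List.Sublist.append_left
      rw [hdd]; exact List.drop_sublist _ _
    rw [List.take_append_drop] at hsub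
    exact hs.sublist hsub
  exact ⟨hLeq, hrm, hrest_s⟩

-- B's build loop, characterised
lemma build_char (p : Int) (bset : PySem.Set Int) :
    ∀ (l : List Int) (u0 u1 : List Int),
      l.foldl (minRevBuild p bset) (u0, u1) =
        (u0 ++ l.filter (fun i => decide (i ≠ p ∧ i ∉ bset ∧ i % 2 = 0)),
         u1 ++ l.filter (fun i => decide (i ≠ p ∧ i ∉ bset ∧ i % 2 = 1))) := by
  intro l
  induction l with
  | nil => intro u0 u1; simp
  | cons i t ih =>
    intro u0 u1
    have hm : PySem.Int.mod i 2 = i % 2 := PySem.Int.mod_eq_emod_of_pos (by norm_num)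
    simp only [List.foldl_cons, List.filter_cons, minRevBuild, hm]
    by_cases hc : i ≠ p ∧ i ∉ bset
    · by_cases hp : i % 2 = 0
      · simp only [if_pos hc, if_pos hp, ih]
        simp [hc.1, hc.2, hp, List.append_assoc]
      · have h1 : i % 2 = 1 := by omega
        simp only [if_pos hc, if_neg hp, ih]
        simp [hc.1, hc.2, h1, List.append_assoc]
    · simp only [if_neg hc, ih]
      rcases not_and_or.1 hc with h | h
      · simp only [not_not] at h
        simp [h]
      · simp only [not_not] at h
        simp [h]

lemma pairwise_lt_map_add_pyRange_two (i a b : Int) :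
    ((PySem.List.pyRange a b 2).map (fun m => i + m)).Pairwise (· < ·) := by
  rw [PySem.List.pyRange_of_pos a b (by norm_num)]
  rw [List.map_map]
  apply List.Pairwise.map (R := (· < ·))
  · intro x y h; simp; omega
  · exact List.pairwise_lt_range

-- the lockstep simulation: under the invariant the two loops compute the same answer
lemma loop_eq (n k : Int) (bset : PySem.Set Int) :
    ∀ (fuel : Nat) (ans : List Int) (visited : PySem.Set Int) (u0 u1 : List Int)
      (q : List (Int × Int)), MRInv n bset visited u0 u1 →
      minRevLoopA n k bset fuel ans visited q = minRevLoopB n k fuel ans u0 u1 q := by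
  intro fuel
  induction fuel with
  | zero => intros; rfl
  | succ f ih =>
    rintro ans visited u0 u1 (_ | ⟨⟨i, op⟩, q⟩) hInv
    · rfl
    obtain ⟨hp0, hp1, hm0, hm1⟩ := hInv
    set lo := max (i - k + 1) (k - 1 - i) with hlodef
    set hi := min (i + k - 1) (2 * (n - 1) - (k - 1) - i) with hhidef
    set js := (PySem.List.pyRange (-k + 1) k 2).map (fun m => i + m) with hjsdef
    have hjss : js.Pairwise (· < ·) := pairwise_lt_map_add_pyRange_two i (-k + 1) k
    have hjsnd : js.Nodup := hjss.imp ne_of_lt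
    set L := js.filter (fun j => decide (0 ≤ j ∧ j < n ∧ k - 1 ≤ i + j ∧
        i + j ≤ 2 * (n - 1) - (k - 1) ∧ j ∉ visited ∧ j ∉ bset)) with hLdef
    have hLs : L.Pairwise (· < ·) := hjss.filter _
    have hjsm : ∀ j : Int, j ∈ js ↔
        (-k + 1 ≤ j - i ∧ j - i < k ∧ (2:Int) ∣ (j - i + k - 1)) := by
      intro j
      simp only [hjsdef, List.mem_map,
        PySem.List.mem_pyRange_iff_of_pos (by norm_num : (0:Int) < 2)]
      constructor
      · rintro ⟨m, ⟨h1, h2, h3⟩, rfl⟩; omega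
      · rintro ⟨h1, h2, h3⟩; exact ⟨j - i, ⟨by omega, by omega, by omega⟩, by ring⟩
    have hLm : ∀ j : Int, j ∈ L ↔ (0 ≤ j ∧ j < n ∧ j % 2 = lo % 2 ∧
        j ∉ visited ∧ j ∉ bset ∧ lo ≤ j ∧ j ≤ hi) := by
      intro j
      simp only [hLdef, List.mem_filter, decide_eq_true_eq, hjsm j]
      constructor
      · rintro ⟨⟨a1, a2, a3⟩, c1, c2, c3, c4, cv, cb⟩
        exact ⟨c1, c2, by omega, cv, cb, by omega, by omega⟩
      · rintro ⟨c1, c2, cpar, cv, cb, chlo, chhi⟩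
        exact ⟨⟨by omega, by omega, by omega⟩, c1, c2, by omega, by omega, cv, cb⟩
    -- unfold one step of A
    have hA : minRevLoopA n k bset (f + 1) ans visited ((i, op) :: q) =
        minRevLoopA n k bset f (L.foldl (fun a j => PySem.List.pySetD a j op) ans)
          (visited ++ L) (q ++ L.map (fun j => (j, op + 1))) := by
      show minRevLoopA n k bset f _ _ _ = _
      rw [show minRevStepA n k bset i op =
        (fun st m => minRevBody n k bset i op st (i + m)) from rfl]
      rw [← List.foldl_map]
      rw [foldA_char n k bset i op js hjsnd visited ans q]
    rw [hA]
    by_cases hw : lo ≤ hi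
    · -- window nonempty possible: B extracts the chunk
      have hmod : PySem.Int.mod lo 2 = lo % 2 :=
        PySem.Int.mod_eq_emod_of_pos (by norm_num)
      by_cases hpar : lo % 2 = 0
      · -- even window
        have harr : ∀ j : Int, j ∈ u0 ↔
            (0 ≤ j ∧ j < n ∧ j % 2 = lo % 2 ∧ j ∉ visited ∧ j ∉ bset) := by
          intro j; rw [hm0 j, hpar]
        have hLm' : ∀ j : Int, j ∈ L ↔ (j ∈ u0 ∧ lo ≤ j ∧ j ≤ hi) := by
          intro j; rw [hLm j, harr j]; tauto
        obtain ⟨hLeq, hrm, hrs⟩ := chunk_eq u0 L lo hi hp0 hw hLs hLm'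
        have hB : minRevLoopB n k (f + 1) ans u0 u1 ((i, op) :: q) =
            minRevLoopB n k f (L.foldl (fun a j => PySem.List.pySetD a j op) ans)
              (u0.take (PySem.List.bisectLeft u0 lo) ++
               u0.drop (PySem.List.bisectRight u0 hi)) u1
              (q ++ L.map (fun j => (j, op + 1))) := by
          simp only [minRevLoopB]
          simp only [← hlodef, ← hhidef, hmod]
          rw [if_pos hw]
          simp only [if_pos hpar]
          rw [← hLeq, foldB_char]
        rw [hB]
        apply ih
        refine ⟨hrs, hp1, ?_, ?_⟩
        · intro j
          rw [hrm j, harr j]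
          constructor
          · rintro ⟨⟨h0, h1, hp, hv, hb⟩, hnw⟩
            refine ⟨h0, h1, by omega, ?_, hb⟩
            intro hmem
            rcases List.mem_append.1 hmem with h | h
            · exact hv h
            · exact hnw ((hLm j).1 h).2.2.2.2.2
          · rintro ⟨h0, h1, hp, hv', hb⟩
            have hv : j ∉ visited := fun h => hv' (List.mem_append.2 (Or.inl h))
            have hnL : j ∉ L := fun h => hv' (List.mem_append.2 (Or.inr h))
            refine ⟨⟨h0, h1, by omega, hv, hb⟩, ?_⟩
            rintro ⟨hlo', hhi'⟩
            exact hnL ((hLm j).2 ⟨h0, h1, by omega, hv, hb, hlo', hhi'⟩)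
        · intro j
          rw [hm1 j]
          constructor
          · rintro ⟨h0, h1, hp, hv, hb⟩
            refine ⟨h0, h1, hp, ?_, hb⟩
            intro hmem
            rcases List.mem_append.1 hmem with h | h
            · exact hv h
            · have := ((hLm j).1 h).2.2.1; omega
          · rintro ⟨h0, h1, hp, hv', hb⟩
            exact ⟨h0, h1, hp, fun h => hv' (List.mem_append.2 (Or.inl h)), hb⟩
      · -- odd window
        have hpar1 : lo % 2 = 1 := by omega
        have harr : ∀ j : Int, j ∈ u1 ↔
            (0 ≤ j ∧ j < n ∧ j % 2 = lo % 2 ∧ j ∉ visited ∧ j ∉ bset) := by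
          intro j; rw [hm1 j, hpar1]
        have hLm' : ∀ j : Int, j ∈ L ↔ (j ∈ u1 ∧ lo ≤ j ∧ j ≤ hi) := by
          intro j; rw [hLm j, harr j]; tauto
        obtain ⟨hLeq, hrm, hrs⟩ := chunk_eq u1 L lo hi hp1 hw hLs hLm'
        have hB : minRevLoopB n k (f + 1) ans u0 u1 ((i, op) :: q) =
            minRevLoopB n k f (L.foldl (fun a j => PySem.List.pySetD a j op) ans)
              u0 (u1.take (PySem.List.bisectLeft u1 lo) ++
               u1.drop (PySem.List.bisectRight u1 hi))
              (q ++ L.map (fun j => (j, op + 1))) := by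
          simp only [minRevLoopB]
          simp only [← hlodef, ← hhidef, hmod]
          rw [if_pos hw]
          simp only [if_neg hpar]
          rw [← hLeq, foldB_char]
        rw [hB]
        apply ih
        refine ⟨hp0, hrs, ?_, ?_⟩
        · intro j
          rw [hm0 j]
          constructor
          · rintro ⟨h0, h1, hp, hv, hb⟩
            refine ⟨h0, h1, hp, ?_, hb⟩
            intro hmem
            rcases List.mem_append.1 hmem with h | h
            · exact hv h
            · have := ((hLm j).1 h).2.2.1; omega
          · rintro ⟨h0, h1, hp, hv', hb⟩
            exact ⟨h0, h1, hp, fun h => hv' (List.mem_append.2 (Or.inl h)), hb⟩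
        · intro j
          rw [hrm j, harr j]
          constructor
          · rintro ⟨⟨h0, h1, hp, hv, hb⟩, hnw⟩
            refine ⟨h0, h1, by omega, ?_, hb⟩
            intro hmem
            rcases List.mem_append.1 hmem with h | h
            · exact hv h
            · exact hnw ((hLm j).1 h).2.2.2.2.2
          · rintro ⟨h0, h1, hp, hv', hb⟩
            have hv : j ∉ visited := fun h => hv' (List.mem_append.2 (Or.inl h))
            have hnL : j ∉ L := fun h => hv' (List.mem_append.2 (Or.inr h))
            refine ⟨⟨h0, h1, by omega, hv, hb⟩, ?_⟩
            rintro ⟨hlo', hhi'⟩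
            exact hnL ((hLm j).2 ⟨h0, h1, by omega, hv, hb, hlo', hhi'⟩)
    · -- empty window: both sides pass the node unchanged
      have hLnil : L = [] := by
        rw [List.eq_nil_iff_forall_not_mem]
        intro j hj
        have := (hLm j).1 hj
        omega
      have hB : minRevLoopB n k (f + 1) ans u0 u1 ((i, op) :: q) =
          minRevLoopB n k f ans u0 u1 q := by
        simp only [minRevLoopB]
        simp only [← hlodef, ← hhidef]
        rw [if_neg hw]
      rw [hB, hLnil]
      simp only [List.foldl_nil, List.map_nil, List.append_nil]
      exact ih ans visited u0 u1 q ⟨hp0, hp1, hm0, hm1⟩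

-- ===== VERDICT (by name: the statement is the Claim_ definition above) =====
theorem minReverseOperations_spec : Claim_equal_minReverseOperations := by
  intro n p banned k _hdom _hpre
  show minReverseOperations n p banned k = minReverseOperations_alt n p banned k
  unfold minReverseOperations minReverseOperations_alt
  simp only [build_char p (PySem.Set.ofList banned), List.nil_append]
  apply loop_eq
  refine ⟨(PySem.List.pairwise_lt_pyRange_one 0 n).filter _,
          (PySem.List.pairwise_lt_pyRange_one 0 n).filter _, ?_, ?_⟩
  · intro j
    simp only [List.mem_filter, PySem.List.mem_pyRange_one, decide_eq_true_eq,
      List.mem_singleton]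
    tauto
  · intro j
    simp only [List.mem_filter, PySem.List.mem_pyRange_one, decide_eq_true_eq,
      List.mem_singleton]
    tauto
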